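-- pv_equiv track=rewrite | github.com/nuruvilu/advent-of-code-2021 | 2023/src/day13/part2.py | get_badlines
-- ===== SOURCE A (Python) =====
-- from collections import defaultdict
--
-- def get_badlines(grid):
--     badlines = defaultdict(int)
--     for j in range(1, len(grid[0])):
--         counted = False
--         for i, row in enumerate(grid):
--             left, right = row[:j], row[j:]
--             smudges = 0
--             for k, (l, r) in enumerate(zip(left[::-1], right)):
--                 if l != r:
--                     smudges += 1
--                     if smudges > 1:
--                         break
--             if smudges < 1:
--                 continue
--             elif smudges < 2 and not counted:
--                 counted = True
--             else:
--                 break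
--         else:
--             if counted:
--                 badlines[j] += 1
--     return badlines
-- ===== SOURCE B (Python) =====
-- from collections import defaultdict
--
-- def get_badlines(grid):
--     width = len(grid[0])
--     totals = defaultdict(int)
--     for row in grid:
--         n = len(row)
--         for j in range(1, width):
--             totals[j] += sum(row[j - 1 - k] != row[j + k] for k in range(min(j, n - j)))
--     return {j: 1 for j in range(1, width) if totals[j] == 1}
-- ===== Notes on version B (the rewrite author's own statement) =====
-- stated objective: alternative
-- what changed: Replaces A's axis-major stateful scan (slices+zip, per-row early breaks, a 'counted' flag, for-else) by a row-major single pass that accumulates the exact per-axis mismatch totals in a dict and then emits the axes whose total equals 1.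
import Mathlib
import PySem

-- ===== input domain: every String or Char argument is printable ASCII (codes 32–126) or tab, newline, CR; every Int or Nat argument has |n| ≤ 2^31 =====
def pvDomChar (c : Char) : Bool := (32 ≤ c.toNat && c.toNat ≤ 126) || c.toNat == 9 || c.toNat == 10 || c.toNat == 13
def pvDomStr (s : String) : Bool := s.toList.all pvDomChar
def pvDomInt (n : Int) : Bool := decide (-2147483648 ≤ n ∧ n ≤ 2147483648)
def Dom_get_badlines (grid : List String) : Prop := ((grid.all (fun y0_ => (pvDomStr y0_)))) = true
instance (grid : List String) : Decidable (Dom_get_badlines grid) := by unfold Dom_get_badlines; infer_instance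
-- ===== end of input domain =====

-- B replaces A's axis-major stateful scan (slices+zip, early breaks, 'counted' flag, for-else) by a
-- row-major pass accumulating exact per-axis mismatch totals in a dict, then emits axes with total 1.

-- ===== PORT A =====
-- inner k-loop over zip(left[::-1], right): count mismatches, break once smudges > 1
def pvSmudgeLoop : List (Char × Char) → Int → Int
  | [], s => s
  | (l, r) :: rest, s =>
    if l ≠ r then
      if s + 1 > 1 then s + 1 else pvSmudgeLoop rest (s + 1)
    else pvSmudgeLoop rest s

-- the 'for i, row in enumerate(grid)' loop; none = break (no for-else), some counted = completed
def pvARows (j : Int) : List String → Bool → Option Bool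
  | [], counted => some counted
  | row :: rest, counted =>
    let cs := row.toList
    let left := PySem.List.slice cs none (some j)       -- row[:j]
    let right := PySem.List.slice cs (some j) none      -- row[j:]
    let s := pvSmudgeLoop (left.reverse.zip right) 0    -- left[::-1] is reverse
    if s < 1 then pvARows j rest counted
    else if s < 2 ∧ counted = false then pvARows j rest true
    else none

def get_badlines (grid : List String) : List (Int × Int) :=
  let width : Int := PySem.Str.len (PySem.List.pyGetD grid 0 "")  -- len(grid[0]); in range under Pre_
  let badlines := (PySem.List.pyRange 1 width 1).foldl
    (fun d j =>
      match pvARows j grid false with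
      | none => d
      | some counted => if counted then d.insert j (d.getD j 0 + 1) else d)
    (PySem.Dict.empty : PySem.Dict Int Int)
  badlines.items

-- ===== PORT B =====
-- sum(row[j-1-k] != row[j+k] for k in range(min(j, n-j))); indices are always in range, so the
-- Option comparison via pyGet? is exact
def pvMism (cs : List Char) (n j : Int) : Int :=
  (PySem.List.pyRange 0 (min j (n - j)) 1).foldl
    (fun acc k =>
      acc + (if PySem.List.pyGet? cs (j - 1 - k) ≠ PySem.List.pyGet? cs (j + k) then 1 else 0))
    0

def get_badlines_alt (grid : List String) : List (Int × Int) :=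
  let width : Int := PySem.Str.len (PySem.List.pyGetD grid 0 "")  -- len(grid[0]); in range under Pre_
  let totals := grid.foldl
    (fun d row =>
      let cs := row.toList
      let n : Int := cs.length
      (PySem.List.pyRange 1 width 1).foldl
        (fun d j => d.modify j 0 (· + pvMism cs n j)) d)
    (PySem.Dict.empty : PySem.Dict Int Int)
  (((PySem.List.pyRange 1 width 1).filter (fun j => totals.getD j 0 == 1)).foldl
    (fun d j => d.insert j 1) (PySem.Dict.empty : PySem.Dict Int Int)).items

-- ===== PRECONDITION & SPEC =====
-- Pre_ excludes only the empty grid, on which A's grid[0] raises IndexError (B raises there too).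
def Pre_get_badlines (grid : List String) : Prop := grid ≠ []
instance (grid : List String) : Decidable (Pre_get_badlines grid) := by unfold Pre_get_badlines; infer_instance
def pvWitness_get_badlines : List String := ["#.#", "###"]

def Spec_get_badlines (grid : List String) (out : List (Int × Int)) : Prop := out = get_badlines_alt grid
instance (grid : List String) (out : List (Int × Int)) : Decidable (Spec_get_badlines grid out) := by unfold Spec_get_badlines; infer_instance

-- ===== CLAIM (what is proved, stated in full; the proofs are below) =====
def Claim_equal_get_badlines : Prop := ∀ (grid : List String), Dom_get_badlines grid → Pre_get_badlines grid → Spec_get_badlines grid (get_badlines grid)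

-- ===== LEMMAS AND PROOFS =====

def pvNe (p : Char × Char) : Bool := p.1 != p.2

-- exact mismatch count of a row at axis j (what both programs are really counting)
def pvC (j : Int) (row : String) : Nat :=
  ((PySem.List.slice row.toList none (some j)).reverse.zip
    (PySem.List.slice row.toList (some j) none)).countP pvNe

def pvT (j : Int) (rows : List String) : Nat := (rows.map (pvC j)).sum

lemma pvSmudgeLoop_one (zs : List (Char × Char)) :
    pvSmudgeLoop zs 1 = if zs.countP pvNe = 0 then 1 else 2 := by
  induction zs with
  | nil => simp [pvSmudgeLoop]
  | cons p rest ih =>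
    obtain ⟨l, r⟩ := p
    rw [pvSmudgeLoop, List.countP_cons]
    by_cases h : l = r
    · rw [if_neg (by simp [h])]
      simp [pvNe, h, ih]
    · rw [if_pos (by simp [h]), if_pos (by omega)]
      have : pvNe (l, r) = true := by simp [pvNe, h]
      rw [this]
      simp

lemma pvSmudgeLoop_zero (zs : List (Char × Char)) :
    pvSmudgeLoop zs 0 = min ((zs.countP pvNe : Int)) 2 := by
  induction zs with
  | nil => simp [pvSmudgeLoop]
  | cons p rest ih =>
    obtain ⟨l, r⟩ := p
    rw [pvSmudgeLoop, List.countP_cons]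
    by_cases h : l = r
    · rw [if_neg (by simp [h])]
      simp [pvNe, h, ih]
    · rw [if_pos (by simp [h]), if_neg (by omega),
        show (0:Int) + 1 = 1 by omega, pvSmudgeLoop_one rest]
      have : pvNe (l, r) = true := by simp [pvNe, h]
      rw [this]
      by_cases hc : rest.countP pvNe = 0
      · rw [if_pos hc, hc]; simp
      · rw [if_neg hc]
        have h1 : 1 ≤ rest.countP pvNe := Nat.one_le_iff_ne_zero.2 hc
        simp only [if_true]
        push_cast
        omega

lemma pvARows_cons (j : Int) (row : String) (rest : List String) (counted : Bool) :
    pvARows j (row :: rest) counted =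
      (if (min ((pvC j row : Nat) : Int) 2) < 1 then pvARows j rest counted
       else if (min ((pvC j row : Nat) : Int) 2) < 2 ∧ counted = false then pvARows j rest true
       else none) := by
  rw [pvARows, pvSmudgeLoop_zero]
  rfl

lemma pvARows_true (j : Int) (rows : List String) :
    (pvARows j rows true = some true) ↔ pvT j rows = 0 := by
  induction rows with
  | nil => simp [pvARows, pvT]
  | cons row rest ih =>
    rw [pvARows_cons]
    simp only [pvT, List.map_cons, List.sum_cons] at *
    split_ifs with h1 h2
    · rw [ih]; omega
    · exact absurd h2.2 (by simp)
    · simp only [reduceCtorEq, false_iff]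
      omega

lemma pvARows_false (j : Int) (rows : List String) :
    (pvARows j rows false = some true) ↔ pvT j rows = 1 := by
  induction rows with
  | nil => simp [pvARows, pvT]
  | cons row rest ih =>
    rw [pvARows_cons]
    simp only [pvT, List.map_cons, List.sum_cons] at *
    split_ifs with h1 h2
    · rw [ih]; omega
    · rw [pvARows_true]
      simp only [pvT]
      omega
    · have hc : ¬ (min ((pvC j row : Nat) : Int) 2 < 2) := fun h => h2 ⟨h, by simp⟩
      simp only [reduceCtorEq, false_iff]
      omega

lemma pvMism_eq_C (row : String) (j : Int) (hj : 1 ≤ j) :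
    pvMism row.toList (row.toList.length : Int) j = (pvC j row : Int) := by
  unfold pvMism pvC
  rw [PySem.List.slice_to _ (by omega), PySem.List.slice_from _ (by omega)]
  set cs := row.toList with hcs
  have hjj : ((j.toNat : Int)) = j := Int.toNat_of_nonneg (by omega)
  by_cases hd : cs.length ≤ j.toNat
  · rw [PySem.List.pyRange_one_eq_nil (by omega : min j ((cs.length : Int) - j) ≤ 0)]
    rw [List.drop_eq_nil_of_le hd]
    simp
  · push_neg at hd
    have hlt : (List.take j.toNat cs).length = j.toNat := by
      simp; omega
    have hld : (List.drop j.toNat cs).length = cs.length - j.toNat := by simp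
    rw [PySem.List.foldl_add]
    rw [PySem.List.pyRange_one, List.map_map]
    rw [← PySem.List.sum_map_ite_one_zero]
    rw [Int.zero_add]
    congr 1
    apply List.ext_getElem
    · simp
      omega
    · intro i h1 h2
      simp only [List.getElem_map, List.getElem_range, Function.comp_apply]
      have hi : i < min j.toNat (cs.length - j.toNat) := by
        simp at h1
        omega
      rw [List.getElem_zip, List.getElem_reverse, List.getElem_take, List.getElem_drop]
      rw [PySem.List.pyGet?_eq_some_getElem _ (by omega) (by omega)]
      rw [PySem.List.pyGet?_eq_some_getElem _ (by omega) (by omega)]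
      have e1 : (j - 1 - ((i : Nat) : Int)).toNat = (List.take j.toNat cs).length - 1 - i := by
        rw [hlt]; omega
      have e2 : (j + ((i : Nat) : Int)).toNat = j.toNat + i := by omega
      simp only [Int.zero_add] at e1 e2 ⊢
      simp only [e1, e2, pvNe]
      simp [bne_iff_ne]

lemma pvGetD_foldl_modify_add (ks : List Int) (f : Int → Int) :
    ∀ (d : PySem.Dict Int Int) (j : Int), ks.Nodup →
    (ks.foldl (fun d k => d.modify k 0 (· + f k)) d).getD j 0
      = d.getD j 0 + (if j ∈ ks then f j else 0) := by
  induction ks with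
  | nil => simp
  | cons k ks ih =>
    intro d j hnd
    rw [List.foldl_cons, ih _ _ hnd.of_cons]
    rw [PySem.Dict.getD_modify]
    by_cases hk : j = k
    · subst hk
      have : j ∉ ks := (List.nodup_cons.1 hnd).1
      simp [this]
    · simp [hk, List.mem_cons]

lemma pvItems_foldA (ks : List Int) (P : Int → Bool) :
    ∀ (d : PySem.Dict Int Int), ks.Nodup → (∀ k ∈ ks, d.contains k = false) →
    (ks.foldl (fun d j => if P j then d.insert j (d.getD j 0 + 1) else d) d).items
      = d.items ++ (ks.filter P).map (fun j => (j, (1 : Int))) := by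
  induction ks with
  | nil => simp
  | cons k ks ih =>
    intro d hnd hfresh
    rw [List.foldl_cons, List.filter_cons]
    have hk0 : d.contains k = false := hfresh k (by simp)
    by_cases hP : P k
    · rw [if_pos hP, if_pos hP]
      rw [ih _ hnd.of_cons]
      · rw [PySem.Dict.getD_of_not_contains d 0 hk0,
          PySem.Dict.items_insert_of_not_contains d _ hk0]
        simp
      · intro a ha
        rw [PySem.Dict.contains_insert]
        have : a ≠ k := fun h => (List.nodup_cons.1 hnd).1 (h ▸ ha)
        simp [this, hfresh a (by simp [ha])]
    · rw [if_neg hP, if_neg hP]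
      rw [ih _ hnd.of_cons (fun a ha => hfresh a (by simp [ha]))]

lemma pvItems_foldB (ks : List Int) :
    ∀ (d : PySem.Dict Int Int), ks.Nodup → (∀ k ∈ ks, d.contains k = false) →
    (ks.foldl (fun d j => d.insert j 1) d).items = d.items ++ ks.map (fun j => (j, (1 : Int))) := by
  induction ks with
  | nil => simp
  | cons k ks ih =>
    intro d hnd hfresh
    rw [List.foldl_cons, ih _ hnd.of_cons, PySem.Dict.items_insert_of_not_contains d _ (hfresh k (by simp))]
    · simp
    · intro a ha
      rw [PySem.Dict.contains_insert]
      have : a ≠ k := fun h => (List.nodup_cons.1 hnd).1 (h ▸ ha)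
      simp [this, hfresh a (by simp [ha])]

lemma pvTotals (width j : Int) (hj : j ∈ PySem.List.pyRange 1 width 1) :
    ∀ (rows : List String) (d : PySem.Dict Int Int),
    (rows.foldl (fun d row =>
        (PySem.List.pyRange 1 width 1).foldl
          (fun d j => d.modify j 0 (· + pvMism row.toList (row.toList.length : Int) j)) d) d).getD j 0
      = d.getD j 0 + (rows.map (fun row => pvMism row.toList (row.toList.length : Int) j)).sum := by
  intro rows
  induction rows with
  | nil => simp
  | cons row rest ih =>
    intro d
    rw [List.foldl_cons, ih]
    rw [pvGetD_foldl_modify_add _ _ _ _ (PySem.List.nodup_pyRange_one 1 width)]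
    simp only [hj, if_pos, List.map_cons, List.sum_cons]
    ring

-- ===== VERDICT (by name: the statement is the Claim_ definition above) =====
theorem get_badlines_spec : Claim_equal_get_badlines := by
  intro grid _hdom _hpre
  unfold Spec_get_badlines get_badlines get_badlines_alt
  set width : Int := PySem.Str.len (PySem.List.pyGetD grid 0 "") with hw
  have hstepA : ∀ (d : PySem.Dict Int Int) (j : Int),
      (match pvARows j grid false with
       | none => d
       | some counted => if counted then d.insert j (d.getD j 0 + 1) else d)
      = if decide (pvARows j grid false = some true) then d.insert j (d.getD j 0 + 1) else d := by
    intro d j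
    cases h : pvARows j grid false with
    | none => simp
    | some b => cases b <;> simp
  simp only [hstepA]
  rw [pvItems_foldA _ _ _ (PySem.List.nodup_pyRange_one 1 width)
      (fun k _ => PySem.Dict.contains_empty k)]
  rw [pvItems_foldB _ _ ((PySem.List.nodup_pyRange_one 1 width).filter _)
      (fun k _ => PySem.Dict.contains_empty k)]
  simp only [show (PySem.Dict.empty : PySem.Dict Int Int).items = [] from rfl, List.nil_append]
  congr 1
  apply List.filter_congr
  intro j hj
  have hj1 : 1 ≤ j := (PySem.List.mem_pyRange_one.1 hj).1
  rw [pvTotals width j hj grid PySem.Dict.empty]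
  rw [List.map_congr_left (fun row (_ : row ∈ grid) => pvMism_eq_C row j hj1)]
  have hsum : ∀ (l : List String),
      (l.map (fun row => ((pvC j row : Nat) : Int))).sum = (((l.map (pvC j)).sum : Nat) : Int) := by
    intro l
    induction l with
    | nil => simp
    | cons r rs ih => simp [ih]
  rw [hsum]
  rw [Bool.eq_iff_iff]
  simp only [decide_eq_true_eq, beq_iff_eq, PySem.Dict.getD_empty, Int.zero_add]
  rw [pvARows_false]
  unfold pvT
  omega
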